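-- pv_equiv track=rewrite | github.com/luizapozzobon/cse517 | stableprompt_tc_grpo.py | shard_list
-- ===== SOURCE A (Python) =====
-- def shard_list(data_list, num_shards, shard_index):
--     """
--     Manually shard a list into num_shards parts and return the shard at shard_index.
--
--     Args:
--         data_list: The list to be sharded
--         num_shards: Total number of shards
--         shard_index: Index of the shard to return (0-indexed)
--
--     Returns:
--         A subset of the original list corresponding to the requested shard
--     """
--     # Calculate shard size and starting/ending indices
--     list_length = len(data_list)
--     items_per_shard = list_length // num_shards
--     remainder = list_length % num_shards
--
--     # Distribute remainder items among the first 'remainder' shards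
--     start_idx = 0
--     for i in range(shard_index):
--         shard_size = items_per_shard + (1 if i < remainder else 0)
--         start_idx += shard_size
--
--     # Calculate end index for this shard
--     shard_size = items_per_shard + (1 if shard_index < remainder else 0)
--     end_idx = start_idx + shard_size
--
--     return data_list[start_idx:end_idx]
-- ===== SOURCE B (Python) =====
-- def shard_list(data_list, num_shards, shard_index):
--     q, r = divmod(len(data_list), num_shards)
--     start = q * shard_index + min(shard_index, r)
--     return data_list[start:start + q + (1 if shard_index < r else 0)]
-- ===== Notes on version B (the rewrite author's own statement) =====
-- stated objective: alternative
-- what changed: Replaces the O(shard_index) accumulation loop with the closed-form start index q*shard_index + min(shard_index, r); Pre_ excludes num_shards = 0 (ZeroDivisionError) and negative shard_index, which is outside the natural domain of a 0-indexed shard number and where A's empty range loop accidentally returns a prefix of the list.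
-- intended difference: For shard 0 of a negative num_shards that does not divide len(data_list) (with len + len//num_shards > 0), A returns the accidental prefix data_list[0 : len + len//num_shards] produced by Python's floor division, while B returns [], the sensible value since no valid sharding exists for a negative shard count. — e.g. on shard_list([1, 2, 3], -2, 0): A returns [1], B returns []
-- outside the precondition, e.g. on shard_list([1, 2, 3], 2, -1): A returns [1, 2], B returns []
import Mathlib
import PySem

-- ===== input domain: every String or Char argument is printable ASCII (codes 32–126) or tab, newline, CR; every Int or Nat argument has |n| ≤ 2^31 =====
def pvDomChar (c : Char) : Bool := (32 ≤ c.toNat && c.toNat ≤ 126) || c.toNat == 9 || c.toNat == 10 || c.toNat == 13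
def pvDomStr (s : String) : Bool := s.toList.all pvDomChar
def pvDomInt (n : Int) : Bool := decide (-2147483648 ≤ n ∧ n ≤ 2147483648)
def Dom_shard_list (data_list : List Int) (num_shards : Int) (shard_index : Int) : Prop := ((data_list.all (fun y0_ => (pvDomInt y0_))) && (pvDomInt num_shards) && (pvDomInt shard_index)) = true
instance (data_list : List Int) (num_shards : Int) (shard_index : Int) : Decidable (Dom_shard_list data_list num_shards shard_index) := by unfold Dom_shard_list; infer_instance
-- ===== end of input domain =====

-- B replaces A's prefix-sum loop by a closed-form start index (objective: alternative).

-- ===== PORT A =====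
def shard_list (data_list : List Int) (num_shards : Int) (shard_index : Int) : List Int :=
  let list_length : Int := data_list.length
  let items_per_shard := PySem.Int.floordiv list_length num_shards
  let remainder := PySem.Int.mod list_length num_shards
  let start_idx := (PySem.List.pyRange 0 shard_index 1).foldl
      (fun start_idx i => start_idx + (items_per_shard + (if i < remainder then 1 else 0))) 0
  let shard_size := items_per_shard + (if shard_index < remainder then 1 else 0)
  let end_idx := start_idx + shard_size
  PySem.List.slice data_list (some start_idx) (some end_idx)

-- ===== PORT B =====
def shard_list_alt (data_list : List Int) (num_shards : Int) (shard_index : Int) : List Int :=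
  let q := PySem.Int.floordiv (data_list.length : Int) num_shards
  let r := PySem.Int.mod (data_list.length : Int) num_shards
  let start := q * shard_index + min shard_index r
  PySem.List.slice data_list (some start) (some (start + q + (if shard_index < r then 1 else 0)))

-- ===== PRECONDITION & SPEC =====
-- Pre_ excludes num_shards = 0, where Python A raises ZeroDivisionError, and negative
-- shard_index, which lies outside the function's natural domain (a 0-indexed shard
-- number): there A's accumulation loop runs zero iterations and accidentally returns a
-- prefix of the list, an artefact of the empty range().
def Pre_shard_list (data_list : List Int) (num_shards : Int) (shard_index : Int) : Prop :=
  num_shards ≠ 0 ∧ 0 ≤ shard_index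
instance (data_list : List Int) (num_shards : Int) (shard_index : Int) : Decidable (Pre_shard_list data_list num_shards shard_index) := by unfold Pre_shard_list; infer_instance
def pvWitness_shard_list : List Int × Int × Int := ([1, 2, 3, 4, 5], 2, 0)

-- For shard 0 of a NEGATIVE num_shards that does not divide the length (with the list
-- long enough that len + len//num_shards > 0), A returns the accidental prefix
-- data[0 : len + len//num_shards] produced by Python's floor division, while B returns
-- [], the sensible value on this unspecified corner (no valid sharding exists for a
-- negative shard count).
def D_shard_list (data_list : List Int) (num_shards : Int) (shard_index : Int) : Prop :=
  shard_index = 0 ∧ num_shards < 0 ∧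
    PySem.Int.mod (data_list.length : Int) num_shards ≠ 0 ∧
    0 < (data_list.length : Int) + PySem.Int.floordiv (data_list.length : Int) num_shards
instance (data_list : List Int) (num_shards : Int) (shard_index : Int) : Decidable (D_shard_list data_list num_shards shard_index) := by unfold D_shard_list; infer_instance
def Spec_shard_list (data_list : List Int) (num_shards : Int) (shard_index : Int) (out : List Int) : Prop := ¬ D_shard_list data_list num_shards shard_index → out = shard_list_alt data_list num_shards shard_index
instance (data_list : List Int) (num_shards : Int) (shard_index : Int) (out : List Int) : Decidable (Spec_shard_list data_list num_shards shard_index out) := by unfold Spec_shard_list; infer_instance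
def pvDiffWitness_shard_list : List Int × Int × Int := ([1, 2, 3], -2, 0)
def pvDiffWitnessOut_shard_list : (List Int) × (List Int) := ([1], [])

-- ===== CLAIM (what is proved, stated in full; the proofs are below) =====
def Claim_unchanged_shard_list : Prop := ∀ (data_list : List Int) (num_shards : Int) (shard_index : Int), Dom_shard_list data_list num_shards shard_index → Pre_shard_list data_list num_shards shard_index → Spec_shard_list data_list num_shards shard_index (shard_list data_list num_shards shard_index)
def Claim_changed_shard_list : Prop := Dom_shard_list (pvDiffWitness_shard_list.1) (pvDiffWitness_shard_list.2.1) (pvDiffWitness_shard_list.2.2) ∧ Pre_shard_list (pvDiffWitness_shard_list.1) (pvDiffWitness_shard_list.2.1) (pvDiffWitness_shard_list.2.2) ∧ D_shard_list (pvDiffWitness_shard_list.1) (pvDiffWitness_shard_list.2.1) (pvDiffWitness_shard_list.2.2) ∧ shard_list (pvDiffWitness_shard_list.1) (pvDiffWitness_shard_list.2.1) (pvDiffWitness_shard_list.2.2) = pvDiffWitnessOut_shard_list.1 ∧ shard_list_alt (pvDiffWitness_shard_list.1) (pvDiffWitness_shard_list.2.1) (pvDiffWitness_shard_list.2.2) =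 pvDiffWitnessOut_shard_list.2 ∧ pvDiffWitnessOut_shard_list.1 ≠ pvDiffWitnessOut_shard_list.2
def Claim_exact_shard_list : Prop := ∀ (data_list : List Int) (num_shards : Int) (shard_index : Int), Dom_shard_list data_list num_shards shard_index → Pre_shard_list data_list num_shards shard_index → D_shard_list data_list num_shards shard_index → shard_list data_list num_shards shard_index ≠ shard_list_alt data_list num_shards shard_index

-- ===== LEMMAS AND PROOFS =====

-- the clamp in PySem's slice, written out
theorem clampIdx_eq (n : Nat) (k : Int) :
    PySem.List.clampIdx n k
    = if k < 0 then (if (n : Int) + k < 0 then 0 else ((n : Int) + k).toNat)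
      else min k.toNat n := by
  unfold PySem.List.clampIdx; rfl

-- a slice whose clamped stop is at most its clamped start is empty
theorem slice_eq_nil (xs : List Int) (a b : Int)
    (h : PySem.List.clampIdx xs.length b ≤ PySem.List.clampIdx xs.length a) :
    PySem.List.slice xs (some a) (some b) = [] := by
  simp only [PySem.List.slice]
  rw [Nat.sub_eq_zero_of_le h]
  exact List.take_zero

-- two negative bounds clamp monotonically
theorem clampIdx_le_of_neg (n : Nat) (a b : Int) (ha : a < 0) (hb : b ≤ a) :
    PySem.List.clampIdx n b ≤ PySem.List.clampIdx n a := by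
  rw [clampIdx_eq, clampIdx_eq]
  split_ifs <;> omega

-- A's accumulation loop over range(n) in closed form (any remainder sign)
theorem shard_start_nat (q r : Int) (n : Nat) :
    (PySem.List.pyRange 0 (n : Int) 1).foldl
      (fun acc i => acc + (q + (if i < r then 1 else 0))) 0
    = q * (n : Int) + min (n : Int) (max r 0) := by
  induction n with
  | zero =>
    simp only [Int.natCast_zero, PySem.List.pyRange_one_eq_nil le_rfl, List.foldl_nil, mul_zero]
    omega
  | succ m ih =>
    have h : ((m + 1 : Nat) : Int) = (m : Int) + 1 := by push_cast; ring
    rw [h, PySem.List.pyRange_one_succ_right (by positivity), List.foldl_append, ih]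
    simp only [List.foldl_cons, List.foldl_nil]
    have hm : (0 : Int) ≤ (m : Int) := Int.natCast_nonneg m
    have hq : q * ((m : Int) + 1) = q * (m : Int) + q := by ring
    rw [hq]
    split_ifs with hc <;> omega

theorem shard_start (q r si : Int) (hsi : 0 ≤ si) :
    (PySem.List.pyRange 0 si 1).foldl
      (fun acc i => acc + (q + (if i < r then 1 else 0))) 0
    = q * si + min si (max r 0) := by
  have h' : si = ((si.toNat : Nat) : Int) := by omega
  rw [h', shard_start_nat q r]

-- both ports as explicit slices (q = len // ns, r = len % ns)
theorem shard_list_eq_slice (data_list : List Int) (num_shards shard_index : Int)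
    (hsi : 0 ≤ shard_index) :
    shard_list data_list num_shards shard_index
    = PySem.List.slice data_list
        (some (PySem.Int.floordiv (data_list.length : Int) num_shards * shard_index
          + min shard_index (max (PySem.Int.mod (data_list.length : Int) num_shards) 0)))
        (some (PySem.Int.floordiv (data_list.length : Int) num_shards * shard_index
          + min shard_index (max (PySem.Int.mod (data_list.length : Int) num_shards) 0)
          + (PySem.Int.floordiv (data_list.length : Int) num_shards
            + (if shard_index < PySem.Int.mod (data_list.length : Int) num_shards then 1 else 0)))) := by
  unfold shard_list
  simp only []
  rw [shard_start _ _ _ hsi]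

-- ===== VERDICT support =====
theorem unchanged_core (data_list : List Int) (num_shards shard_index : Int)
    (hns : num_shards ≠ 0) (hsi : 0 ≤ shard_index)
    (hD : ¬ D_shard_list data_list num_shards shard_index) :
    shard_list data_list num_shards shard_index
    = shard_list_alt data_list num_shards shard_index := by
  rw [shard_list_eq_slice data_list num_shards shard_index hsi]
  unfold shard_list_alt
  simp only []
  rcases lt_or_gt_of_ne hns with hneg | hpos
  · -- num_shards < 0 : remainder r ≤ 0
    have hr := PySem.Int.mod_neg_bounds (a := (data_list.length : Int)) hneg
    set q := PySem.Int.floordiv (data_list.length : Int) num_shards with hq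
    set r := PySem.Int.mod (data_list.length : Int) num_shards with hrdef
    have hmax : max r 0 = 0 := by omega
    have hmin : min shard_index r = r := by omega
    have hif : (if shard_index < r then (1 : Int) else 0) = 0 := by
      rw [if_neg]; omega
    rw [hmax, hmin, hif]
    have hmin0 : min shard_index (0 : Int) = 0 := by omega
    rw [hmin0]
    by_cases hr0 : r = 0
    · rw [hr0]; ring_nf
    · -- r < 0 : both slices are empty
      have hrneg : r < 0 := by omega
      have hid : q * num_shards + r = (data_list.length : Int) :=
        PySem.Int.floordiv_mul_add_mod _ _
      have hlen : (0 : Int) ≤ (data_list.length : Int) := Int.natCast_nonneg _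
      have hqneg : q < 0 := by
        by_contra h
        push_neg at h
        nlinarith
      have hB : PySem.List.slice data_list (some (q * shard_index + r))
          (some (q * shard_index + r + q + 0)) = [] := by
        apply slice_eq_nil
        apply clampIdx_le_of_neg
        · nlinarith
        · omega
      rw [hB]
      apply slice_eq_nil
      rcases eq_or_lt_of_le hsi with hsi0 | hsi1
      · -- shard_index = 0 : ¬D gives len + q ≤ 0, so the stop clamps to 0
        have hD' : ¬ (0 < (data_list.length : Int) + q) := by
          intro hc
          exact hD ⟨hsi0.symm, hneg, by rw [← hrdef]; omega, by rw [← hq]; omega⟩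
        rw [← hsi0]
        rw [clampIdx_eq, clampIdx_eq]
        split_ifs <;> omega
      · -- shard_index ≥ 1 : both bounds negative and decreasing
        apply clampIdx_le_of_neg
        · nlinarith
        · omega
  · -- num_shards > 0 : remainder r ≥ 0, the two closed forms coincide
    have hr := PySem.Int.mod_nonneg (a := (data_list.length : Int)) hpos
    have hmax : max (PySem.Int.mod (data_list.length : Int) num_shards) 0
        = PySem.Int.mod (data_list.length : Int) num_shards := by omega
    rw [hmax]
    congr 2
    ring

-- ===== VERDICT (by name: the statements are the Claim_ definitions above) =====
theorem shard_list_spec : Claim_unchanged_shard_list := by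
  intro data_list num_shards shard_index _ hpre hD
  exact unchanged_core data_list num_shards shard_index hpre.1 hpre.2 hD

theorem shard_list_changed : Claim_changed_shard_list := by
  unfold Claim_changed_shard_list; decide

theorem shard_list_tight : Claim_exact_shard_list := by
  intro data_list num_shards shard_index _ hpre hD
  obtain ⟨hsi0, hneg, hrne, hlen⟩ := hD
  set q := PySem.Int.floordiv (data_list.length : Int) num_shards with hq
  set r := PySem.Int.mod (data_list.length : Int) num_shards with hrdef
  have hr := PySem.Int.mod_neg_bounds (a := (data_list.length : Int)) hneg
  have hrneg : r < 0 := by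
    rcases lt_or_eq_of_le hr.2 with h | h
    · exact h
    · exact absurd h hrne
  have hid : q * num_shards + r = (data_list.length : Int) :=
    PySem.Int.floordiv_mul_add_mod _ _
  have hln : (0 : Int) ≤ (data_list.length : Int) := Int.natCast_nonneg _
  have hqneg : q < 0 := by
    by_contra h
    push_neg at h
    nlinarith
  -- B is empty
  have hB : shard_list_alt data_list num_shards shard_index = [] := by
    unfold shard_list_alt
    simp only [← hq, ← hrdef, hsi0]
    have hmin : min (0 : Int) r = r := by omega
    have hif : (if (0 : Int) < r then (1 : Int) else 0) = 0 := by rw [if_neg]; omega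
    rw [hmin, hif]
    apply slice_eq_nil
    apply clampIdx_le_of_neg
    · omega
    · omega
  -- A is a nonempty prefix
  have hA : (shard_list data_list num_shards shard_index).length
      = ((data_list.length : Int) + q).toNat := by
    rw [shard_list_eq_slice data_list num_shards shard_index (by omega)]
    rw [PySem.List.length_slice]
    simp only [← hq, ← hrdef, hsi0]
    have hmax : max r 0 = 0 := by omega
    have hif : (if (0 : Int) < r then (1 : Int) else 0) = 0 := by rw [if_neg]; omega
    rw [hmax, hif]
    have h1 : q * 0 + min (0 : Int) 0 = 0 := by omega
    rw [h1]
    rw [clampIdx_eq, clampIdx_eq]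
    split_ifs <;> omega
  intro hEq
  rw [hEq, hB] at hA
  simp only [List.length_nil] at hA
  omega
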